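-- pv_equiv track=rewrite | github.com/kapiw04/aoc2024 | python/day22/1.py | get_secret
-- ===== SOURCE A (Python) =====
-- def get_secret(secret, iterations=2000):
--     if iterations == 0:
--         return secret
--
--     def mix(x):
--         return x ^ secret
--
--     def prune(x):
--         return x % 16777216
--
--     secret = mix(secret * 64)
--     secret = prune(secret)
--
--     secret = mix(secret // 32)
--     secret = prune(secret)
--
--     secret = mix(secret * 2048)
--     secret = prune(secret)
--
--     return get_secret(secret, iterations - 1)
-- ===== SOURCE B (Python) =====
-- def get_secret(secret, iterations=2000):
--     for _ in range(iterations):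
--         secret = (secret ^ (secret * 64)) % 16777216
--         secret = (secret ^ (secret // 32)) % 16777216
--         secret = (secret ^ (secret * 2048)) % 16777216
--     return secret
-- ===== Notes on version B (the rewrite author's own statement) =====
-- stated objective: simpler
-- what changed: Replaces the recursion with nested mix/prune closures by a single for-loop applying the three mix-and-prune steps inline to a running secret (no per-iteration function calls or closure creation).
import Mathlib
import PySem

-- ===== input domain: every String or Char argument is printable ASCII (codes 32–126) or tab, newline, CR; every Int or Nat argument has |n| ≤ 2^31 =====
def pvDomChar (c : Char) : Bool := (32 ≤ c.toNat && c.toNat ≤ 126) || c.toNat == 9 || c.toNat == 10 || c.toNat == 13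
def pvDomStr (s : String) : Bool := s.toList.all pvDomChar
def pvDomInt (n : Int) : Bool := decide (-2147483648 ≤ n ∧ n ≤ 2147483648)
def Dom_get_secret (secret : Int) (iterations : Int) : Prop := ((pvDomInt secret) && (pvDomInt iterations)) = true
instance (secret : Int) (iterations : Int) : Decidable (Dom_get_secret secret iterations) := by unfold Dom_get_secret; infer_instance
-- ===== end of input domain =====

-- B replaces A's recursion with nested mix/prune closures by one loop applying the three steps inline (objective: simpler); return-value equivalence for iterations ≥ 0.

-- ===== PORT A =====
-- A recurses with iterations-1 until iterations == 0; the fuel is iterations.toNat (Pre_ keeps iterations ≥ 0, where this is exact).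
def get_secretGoA (secret : Int) : Nat → Int
  | 0 => secret
  | n + 1 =>
    -- secret = prune(mix(secret * 64)); mix x = x ^ secret (the current secret), prune x = x % 16777216
    let s1 := PySem.Int.mod (PySem.Int.bxor (secret * 64) secret) 16777216
    let s2 := PySem.Int.mod (PySem.Int.bxor (PySem.Int.floordiv s1 32) s1) 16777216
    let s3 := PySem.Int.mod (PySem.Int.bxor (s2 * 2048) s2) 16777216
    get_secretGoA s3 n

def get_secret (secret : Int) (iterations : Int) : Int :=
  get_secretGoA secret iterations.toNat

-- ===== PORT B =====
def get_secret_alt (secret : Int) (iterations : Int) : Int :=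
  (PySem.List.pyRange 0 iterations 1).foldl
    (fun s _ =>
      let s1 := PySem.Int.mod (PySem.Int.bxor s (s * 64)) 16777216
      let s2 := PySem.Int.mod (PySem.Int.bxor s1 (PySem.Int.floordiv s1 32)) 16777216
      PySem.Int.mod (PySem.Int.bxor s2 (s2 * 2048)) 16777216)
    secret

-- ===== PRECONDITION & SPEC =====
-- Pre_ excludes iterations < 0, on which A recurses forever (Python raises RecursionError).
def Pre_get_secret (secret : Int) (iterations : Int) : Prop := 0 ≤ iterations
instance (secret : Int) (iterations : Int) : Decidable (Pre_get_secret secret iterations) := by unfold Pre_get_secret; infer_instance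
def pvWitness_get_secret : Int × Int := (123, 5)

def Spec_get_secret (secret : Int) (iterations : Int) (out : Int) : Prop := out = get_secret_alt secret iterations
instance (secret : Int) (iterations : Int) (out : Int) : Decidable (Spec_get_secret secret iterations out) := by unfold Spec_get_secret; infer_instance

-- ===== CLAIM (what is proved, stated in full; the proofs are below) =====
def Claim_equal_get_secret : Prop := ∀ (secret : Int) (iterations : Int), Dom_get_secret secret iterations → Pre_get_secret secret iterations → Spec_get_secret secret iterations (get_secret secret iterations)

-- ===== LEMMAS AND PROOFS =====

-- The three-step bodies of the two ports agree (they differ only in the xor argument order).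
theorem pvStep_eq (s : Int) :
    (let s1 := PySem.Int.mod (PySem.Int.bxor s (s * 64)) 16777216
     let s2 := PySem.Int.mod (PySem.Int.bxor s1 (PySem.Int.floordiv s1 32)) 16777216
     PySem.Int.mod (PySem.Int.bxor s2 (s2 * 2048)) 16777216)
    = (let s1 := PySem.Int.mod (PySem.Int.bxor (s * 64) s) 16777216
       let s2 := PySem.Int.mod (PySem.Int.bxor (PySem.Int.floordiv s1 32) s1) 16777216
       PySem.Int.mod (PySem.Int.bxor (s2 * 2048) s2) 16777216) := by
  simp only [PySem.Int.bxor_comm]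

-- B's fold over any list of length n computes A's fuel recursion.
theorem pvFoldl_eq_goA : ∀ (l : List Int) (s : Int),
    l.foldl
      (fun s _ =>
        let s1 := PySem.Int.mod (PySem.Int.bxor s (s * 64)) 16777216
        let s2 := PySem.Int.mod (PySem.Int.bxor s1 (PySem.Int.floordiv s1 32)) 16777216
        PySem.Int.mod (PySem.Int.bxor s2 (s2 * 2048)) 16777216)
      s = get_secretGoA s l.length := by
  intro l
  induction l with
  | nil => intro s; rfl
  | cons x xs ih =>
    intro s
    rw [List.foldl_cons]
    simp only [List.length_cons, get_secretGoA]
    rw [pvStep_eq s]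
    exact ih _

-- ===== VERDICT (by name: the statement is the Claim_ definition above) =====
theorem get_secret_spec : Claim_equal_get_secret := by
  intro secret iterations _ _
  show get_secret secret iterations = get_secret_alt secret iterations
  unfold get_secret get_secret_alt
  rw [pvFoldl_eq_goA, PySem.List.length_pyRange_one]
  norm_num
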